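-- pv_equiv track=rewrite | github.com/WheelWeight/cards | draw_form.py | lmlc
-- ===== SOURCE A (Python) =====
-- import math
--
-- def mlc(list,n):
--     """
--     max of lens of a column:
--     一条竖列的项长度最大值
--     """
--     column = []
--
--     for i in list:
--         column.append(len(i[n]))#存储此竖列每项的长度
--
--     return max(column)#返回最大值
--
-- def lmlc(list):
--     """
--     alist of the maxs of lens of every column:
--     一个包含所有竖列的 字符串长度最大值 的列表
--     """
--     lmlc = []
--     lr = len(list)#存储列数即横排项数，尽量减少计算量
--
--     i = 0#指向第一项
--     while i <= (lr-1):
--         lmlc.append(math.ceil(mlc(list,i)/8)*8)#求出并存储 此竖列每项应占格数量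
--         i += 1#递增
--
--     return lmlc
-- ===== SOURCE B (Python) =====
-- import math
--
-- def lmlc(list):
--     ncols = len(list)
--     maxes = [0] * ncols
--     for row in list:
--         for j in range(ncols):
--             maxes[j] = max(maxes[j], len(row[j]))
--     return [math.ceil(m / 8) * 8 for m in maxes]
-- ===== Notes on version B (the rewrite author's own statement) =====
-- stated objective: simpler
-- what changed: One row-major pass maintaining running per-column maxima replaces the per-column helper mlc that re-scans all rows for each column; the ceil-to-8 rounding is done in a final comprehension.
import Mathlib
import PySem

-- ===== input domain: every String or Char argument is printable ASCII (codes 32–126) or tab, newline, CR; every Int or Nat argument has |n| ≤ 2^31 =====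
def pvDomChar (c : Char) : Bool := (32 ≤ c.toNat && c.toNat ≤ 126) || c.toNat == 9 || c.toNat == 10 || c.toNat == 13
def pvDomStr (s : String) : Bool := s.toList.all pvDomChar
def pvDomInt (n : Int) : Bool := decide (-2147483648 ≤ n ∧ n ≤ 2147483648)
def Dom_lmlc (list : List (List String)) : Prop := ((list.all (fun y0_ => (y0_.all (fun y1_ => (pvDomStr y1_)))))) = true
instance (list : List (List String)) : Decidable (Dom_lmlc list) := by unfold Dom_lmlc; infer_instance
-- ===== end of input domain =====

-- B does the same work in one row-major pass with running per-column maxima instead of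
-- A's per-column helper mlc re-scanning all rows for each column (same cost, simpler shape).

-- ===== PORT A =====
-- mlc(list, n): max of len(i[n]) over rows i; i[n] via pyGet? (none = IndexError, excluded by Pre_),
-- max(column) via PySem.List.max? (the .getD 0 default is unreachable: mlc is only called with list ≠ []).
def mlcA (list : List (List String)) (n : Int) : Int :=
  let column : List Int :=
    list.foldl (fun col i => col ++ [PySem.Str.len ((PySem.List.pyGet? i n).getD "")]) []
  (PySem.List.max? column (fun x => x)).getD 0

-- the while loop over i = 0 .. lr-1 is the fold over range(0, lr);
-- math.ceil(m/8)*8 is exact on these ints as -((-m)//8)*8.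
def lmlc (list : List (List String)) : List Int :=
  let lr : Int := (list.length : Int)
  (PySem.List.pyRange 0 lr 1).foldl
    (fun acc i => acc ++ [(-(PySem.Int.floordiv (-(mlcA list i)) 8)) * 8]) []

-- ===== PORT B =====
def lmlc_alt (list : List (List String)) : List Int :=
  let ncols := list.length
  let maxes : List Int :=
    list.foldl
      (fun maxes row =>
        (List.range ncols).map
          (fun j => max (maxes.getD j 0) (PySem.Str.len ((PySem.List.pyGet? row (j : Int)).getD ""))))
      (List.replicate ncols 0)
  maxes.map (fun m => (-(PySem.Int.floordiv (-m) 8)) * 8)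

-- ===== PRECONDITION & SPEC =====
-- Pre_ excludes exactly the ragged inputs (some row shorter than the number of rows) on which
-- the Python A raises IndexError in i[n]; B raises there too.
def Pre_lmlc (list : List (List String)) : Prop := ∀ row ∈ list, list.length ≤ row.length
instance (list : List (List String)) : Decidable (Pre_lmlc list) := by unfold Pre_lmlc; infer_instance
def pvWitness_lmlc : List (List String) := [["ab", "c"], ["d", "efg"]]

def Spec_lmlc (list : List (List String)) (out : List Int) : Prop := out = lmlc_alt list
instance (list : List (List String)) (out : List Int) : Decidable (Spec_lmlc list out) := by unfold Spec_lmlc; infer_instance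

-- ===== CLAIM (what is proved, stated in full; the proofs are below) =====
def Claim_equal_lmlc : Prop := ∀ (list : List (List String)), Dom_lmlc list → Pre_lmlc list → Spec_lmlc list (lmlc list)

-- ===== LEMMAS AND PROOFS =====

-- the cell value both ports read at row r, column j
def pvCell (j : Int) (r : List String) : Int :=
  PySem.Str.len ((PySem.List.pyGet? r j).getD "")

theorem pvCell_nonneg (j : Int) (r : List String) : 0 ≤ pvCell j r := by
  simp [pvCell, PySem.Str.len_eq]

-- A's column list is a map
theorem mlcA_column (list : List (List String)) (n : Int) :
    (list.foldl (fun col i => col ++ [PySem.Str.len ((PySem.List.pyGet? i n).getD "")]) []) =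
      list.map (pvCell n) := by
  have h : ∀ (l : List (List String)) (acc : List Int),
      l.foldl (fun col i => col ++ [PySem.Str.len ((PySem.List.pyGet? i n).getD "")]) acc =
        acc ++ l.map (pvCell n) := by
    intro l
    induction l with
    | nil => simp
    | cons r t ih =>
        intro acc
        rw [List.foldl_cons, ih]
        simp [pvCell]
  simpa using h list []

theorem foldl_max_le {m a : Int} (l : List Int) (ha : a ≤ m) (h : ∀ y ∈ l, y ≤ m) :
    l.foldl max a ≤ m := by
  induction l generalizing a with
  | nil => simpa using ha
  | cons x t ih =>
      simp only [List.foldl_cons]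
      exact ih (max_le ha (h x (by simp))) (fun y hy => h y (by simp [hy]))

-- mlcA on a nonempty list equals the running max (starting at 0) of the column's cells
theorem mlcA_eq_foldl (list : List (List String)) (n : Int) (hne : list ≠ []) :
    mlcA list n = list.foldl (fun a r => max a (pvCell n r)) 0 := by
  simp only [mlcA, mlcA_column]
  have hmap : list.map (pvCell n) ≠ [] := by simpa using hne
  obtain ⟨m, hm⟩ : ∃ m, PySem.List.max? (list.map (pvCell n)) (fun x => x) = some m := by
    cases h : PySem.List.max? (list.map (pvCell n)) (fun x => x) with
    | none => exact absurd (Iff.mp (PySem.List.max?_eq_none_iff _ _) h) hmap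
    | some m => exact ⟨m, rfl⟩
  have hmem : m ∈ list.map (pvCell n) := PySem.List.max?_mem hm
  have hmax : ∀ y ∈ list.map (pvCell n), y ≤ m := by
    intro y hy; simpa using PySem.List.max?_isMax hm y hy
  have hfold : list.foldl (fun a r => max a (pvCell n r)) 0 =
      (list.map (pvCell n)).foldl max 0 := by
    rw [List.foldl_map]
  rw [hm, hfold]
  have h0m : (0 : Int) ≤ m := by
    obtain ⟨r, _, hr⟩ := List.mem_map.mp hmem
    exact hr ▸ pvCell_nonneg n r
  have hle : m ≤ (list.map (pvCell n)).foldl max 0 :=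
    (PySem.List.le_foldl_max (list.map (pvCell n)) 0).2 m hmem
  have hge : (list.map (pvCell n)).foldl max 0 ≤ m :=
    foldl_max_le _ h0m hmax
  simpa using le_antisymm hle hge

-- B's fold, once started from a canonical (range-map) state, keeps that shape
theorem alt_fold_char (ncols : Nat) (rows : List (List String)) (φ : Nat → Int) :
    rows.foldl
      (fun maxes row =>
        (List.range ncols).map
          (fun (j : Nat) => max (maxes.getD j 0) (pvCell (j : Int) row)))
      ((List.range ncols).map φ) =
    (List.range ncols).map
      (fun (j : Nat) => rows.foldl (fun a r => max a (pvCell (j : Int) r)) (φ j)) := by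
  induction rows generalizing φ with
  | nil => rfl
  | cons r t ih =>
      simp only [List.foldl_cons]
      have hstep :
          (List.range ncols).map
            (fun (j : Nat) => max (((List.range ncols).map φ).getD j 0) (pvCell (j : Int) r)) =
          (List.range ncols).map (fun (j : Nat) => max (φ j) (pvCell (j : Int) r)) := by
        apply List.map_congr_left
        intro j hj
        have hlt : j < ncols := List.mem_range.mp hj
        rw [List.getD_eq_getElem _ _ (by simpa using hlt)]
        simp
      rw [hstep, ih]

-- A's loop list is a map over pyRange
theorem lmlc_eq_map (list : List (List String)) :
    lmlc list = (PySem.List.pyRange 0 (list.length : Int) 1).map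
      (fun i => (-(PySem.Int.floordiv (-(mlcA list i)) 8)) * 8) := by
  unfold lmlc
  have h : ∀ (l : List Int) (acc : List Int),
      l.foldl (fun acc i => acc ++ [(-(PySem.Int.floordiv (-(mlcA list i)) 8)) * 8]) acc =
        acc ++ l.map (fun i => (-(PySem.Int.floordiv (-(mlcA list i)) 8)) * 8) := by
    intro l
    induction l with
    | nil => simp
    | cons x t ih =>
        intro acc
        rw [List.foldl_cons, ih]
        simp
  simpa using h _ []

-- ===== VERDICT (by name: the statement is the Claim_ definition above) =====
theorem lmlc_spec : Claim_equal_lmlc := by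
  intro list _ _
  simp only [Spec_lmlc, lmlc_alt]
  rw [lmlc_eq_map]
  have hrep : (List.replicate list.length (0 : Int)) =
      (List.range list.length).map (fun _ => (0 : Int)) := by
    simp [List.map_const']
  rw [hrep]
  have hfold := alt_fold_char list.length list (fun _ => 0)
  simp only [pvCell] at hfold
  rw [hfold, List.map_map, PySem.List.pyRange_one, List.map_map]
  simp only [Int.sub_zero, Int.toNat_natCast]
  apply List.map_congr_left
  intro j hj
  have hne : list ≠ [] := by
    intro h
    rw [h] at hj
    simp at hj
  have hm := mlcA_eq_foldl list ((0 : Int) + (j : Int)) hne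
  simp only [pvCell, zero_add] at hm
  simp only [Function.comp_apply, zero_add, hm]
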